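-- pv_equiv track=rewrite | github.com/nasa/OnAIR | src/data_driven_components/pomdp/pomdp_util.py | split_headers
-- ===== SOURCE A (Python) =====
-- import copy
--
-- def split_headers(headers, depth):
--     master_list = copy.deepcopy(headers)
--     arrayed_headers = []
--     for i in range(len(headers)):
--         arrayed_headers.append([headers[i]])
--     for i in range(1, depth):
--         arrayed_headers = split_headers_helper(arrayed_headers, master_list, i)
--     return arrayed_headers
--
-- def split_headers_helper(arrayed_headers, master_list, current_depth):
--     new_headers = []
--     for i in range(len(arrayed_headers)):
--         z = master_list.index(arrayed_headers[i][len(arrayed_headers[i])-1]) + 1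
--         for j in range(z, len(master_list)):
--             new_header = copy.deepcopy(arrayed_headers[i])
--             new_header.append(master_list[j])
--             new_headers.append(new_header)
--     return new_headers
-- ===== SOURCE B (Python) =====
-- def split_headers(headers, depth):
--     # Recursive DFS building each length-`depth` combination directly,
--     # instead of A's level-by-level reassignment loop.
--     if depth <= 1:
--         return [[h] for h in headers]
--     results = []
--
--     def dfs(partial, remaining):
--         if remaining == 0:
--             results.append(partial)
--             return
--         start = headers.index(partial[-1]) + 1
--         for j in range(start, len(headers)):
--             dfs(partial + [headers[j]], remaining - 1)
--
--     for h in headers: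
--         dfs([h], depth - 1)
--     return results
-- ===== Notes on version B (the rewrite author's own statement) =====
-- stated objective: alternative
-- what changed: Replaces A's iterative level-by-level re-expansion (rebuilding the whole list of partial combinations depth-1 times) with a single recursive DFS that emits each full-length combination directly, using the same value-based headers.index(last)+1 rule for the next start index.
import Mathlib
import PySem

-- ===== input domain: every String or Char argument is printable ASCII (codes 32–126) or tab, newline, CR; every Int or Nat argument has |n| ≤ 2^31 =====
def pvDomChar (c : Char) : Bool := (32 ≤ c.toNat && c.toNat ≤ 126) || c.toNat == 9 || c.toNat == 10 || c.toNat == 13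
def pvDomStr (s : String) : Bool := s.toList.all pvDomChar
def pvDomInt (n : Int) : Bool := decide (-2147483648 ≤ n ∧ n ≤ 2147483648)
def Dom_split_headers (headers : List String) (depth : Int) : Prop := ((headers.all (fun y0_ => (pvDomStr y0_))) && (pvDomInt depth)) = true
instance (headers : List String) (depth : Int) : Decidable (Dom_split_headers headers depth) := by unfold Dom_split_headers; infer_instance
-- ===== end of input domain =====

-- B replaces A's iterative level-by-level expansion with a direct recursive DFS over the
-- combination tree (same return value; A mutates nothing observable; deepcopy of strings is identity).

-- ===== PORT A =====
def split_headers_helper (arrayed_headers : List (List String)) (master_list : List String) :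
    List (List String) :=
  arrayed_headers.foldl (fun new_headers cur =>
    let z : Int :=
      ((PySem.List.index? master_list
          (PySem.List.pyGetD cur ((cur.length : Int) - 1) "")).getD 0 : Nat) + 1
    (PySem.List.pyRange z (master_list.length : Int) 1).foldl (fun acc j =>
      acc ++ [cur ++ [PySem.List.pyGetD master_list j ""]]) new_headers) []

def split_headers (headers : List String) (depth : Int) : List (List String) :=
  let master_list := headers
  let arrayed_headers := headers.foldl (fun acc h => acc ++ [[h]]) ([] : List (List String))
  (PySem.List.pyRange 1 depth 1).foldl
    (fun acc _ => split_headers_helper acc master_list) arrayed_headers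

-- ===== PORT B =====
def split_headers_dfs (headers : List String) (part : List String) : Nat → List (List String)
  | 0 => [part]
  | r + 1 =>
    let start : Int :=
      ((PySem.List.index? headers (PySem.List.pyGetD part (-1) "")).getD 0 : Nat) + 1
    (PySem.List.pyRange start (headers.length : Int) 1).foldl (fun acc j =>
      acc ++ split_headers_dfs headers (part ++ [PySem.List.pyGetD headers j ""]) r) []

def split_headers_alt (headers : List String) (depth : Int) : List (List String) :=
  if depth ≤ 1 then headers.map (fun h => [h])
  else headers.foldl (fun acc h => acc ++ split_headers_dfs headers [h] (depth - 1).toNat) []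

-- ===== PRECONDITION & SPEC =====
def Spec_split_headers (headers : List String) (depth : Int) (out : List (List String)) : Prop := out = split_headers_alt headers depth
instance (headers : List String) (depth : Int) (out : List (List String)) : Decidable (Spec_split_headers headers depth out) := by unfold Spec_split_headers; infer_instance

-- ===== CLAIM (what is proved, stated in full; the proofs are below) =====
def Claim_equal_split_headers : Prop := ∀ (headers : List String) (depth : Int), Dom_split_headers headers depth → Spec_split_headers headers depth (split_headers headers depth)

-- ===== LEMMAS AND PROOFS =====

-- one expansion step applied to one partial combination
def pvStep (headers : List String) (c : List String) : List (List String) :=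
  let z : Int :=
    ((PySem.List.index? headers (PySem.List.pyGetD c ((c.length : Int) - 1) "")).getD 0 : Nat) + 1
  (PySem.List.pyRange z (headers.length : Int) 1).map
    (fun j => c ++ [PySem.List.pyGetD headers j ""])

theorem pvLastD_eq (l : List String) :
    PySem.List.pyGetD l (-1) "" = PySem.List.pyGetD l ((l.length : Int) - 1) "" := by
  cases l with
  | nil => simp [PySem.List.pyGetD, PySem.List.pyGet?, PySem.List.pyIdx?]
  | cons x xs =>
    simp [PySem.List.pyGetD, PySem.List.pyGet?, PySem.List.pyIdx?]

theorem helper_eq_flatMap (L : List (List String)) (H : List String) :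
    split_headers_helper L H = L.flatMap (pvStep H) := by
  have aux : ∀ (acc : List (List String)),
      L.foldl (fun new_headers cur =>
        let z : Int :=
          ((PySem.List.index? H
              (PySem.List.pyGetD cur ((cur.length : Int) - 1) "")).getD 0 : Nat) + 1
        (PySem.List.pyRange z (H.length : Int) 1).foldl (fun a j =>
          a ++ [cur ++ [PySem.List.pyGetD H j ""]]) new_headers) acc
      = acc ++ L.flatMap (pvStep H) := by
    induction L with
    | nil => intro acc; simp
    | cons c L ih =>
      intro acc
      rw [List.foldl_cons, ih]
      simp only [List.flatMap_cons, ← List.append_assoc]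
      rw [PySem.List.foldl_append_singleton_eq_map]
      rfl
  have h := aux []
  rw [List.nil_append] at h
  exact h

theorem dfs_succ (H : List String) (p : List String) (r : Nat) :
    split_headers_dfs H p (r + 1) = (pvStep H p).flatMap (fun c => split_headers_dfs H c r) := by
  show (PySem.List.pyRange
      (((PySem.List.index? H (PySem.List.pyGetD p (-1) "")).getD 0 : Nat) + 1)
      (H.length : Int) 1).foldl (fun acc j =>
        acc ++ split_headers_dfs H (p ++ [PySem.List.pyGetD H j ""]) r) [] = _
  rw [pvLastD_eq]
  have := PySem.List.foldl_append_eq_flatMap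
    (fun j => split_headers_dfs H (p ++ [PySem.List.pyGetD H j ""]) r)
    (PySem.List.pyRange
      (((PySem.List.index? H (PySem.List.pyGetD p ((p.length : Int) - 1) "")).getD 0 : Nat) + 1)
      (H.length : Int) 1) []
  simp only [List.nil_append] at this
  rw [this, pvStep, List.flatMap_map]

theorem iterate_eq_flatMap_dfs (H : List String) (r : Nat) (L : List (List String)) :
    (fun l => split_headers_helper l H)^[r] L
      = L.flatMap (fun p => split_headers_dfs H p r) := by
  induction r generalizing L with
  | zero => simp [split_headers_dfs]
  | succ r ih =>
    rw [Function.iterate_succ_apply, ih, helper_eq_flatMap, List.flatMap_assoc]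
    simp only [dfs_succ]

theorem foldl_const_eq_iterate {α β : Type} (f : α → α) (l : List β) (a : α) :
    l.foldl (fun acc _ => f acc) a = f^[l.length] a := by
  induction l generalizing a with
  | nil => rfl
  | cons x xs ih => simp [List.foldl_cons, ih, Function.iterate_succ_apply]

-- ===== VERDICT (by name: the statement is the Claim_ definition above) =====
theorem split_headers_spec : Claim_equal_split_headers := by
  intro headers depth _
  unfold Spec_split_headers split_headers split_headers_alt
  simp only [PySem.List.foldl_append_singleton_eq_map, List.nil_append]
  rw [foldl_const_eq_iterate, PySem.List.length_pyRange_one,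
      iterate_eq_flatMap_dfs]
  by_cases h : depth ≤ 1
  · have hz : (depth - 1).toNat = 0 := by omega
    simp [hz, split_headers_dfs, h]
  · rw [if_neg h, List.flatMap_map]
    have := PySem.List.foldl_append_eq_flatMap
      (fun h => split_headers_dfs headers [h] (depth - 1).toNat) headers
      ([] : List (List String))
    simp only [List.nil_append] at this
    rw [this]
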